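-- pv_equiv track=rewrite | github.com/RouNNdeL/anti-rootkit-lkm | module/anti_rootkit/generate_fops.py | gen_fops_recover
-- ===== SOURCE A (Python) =====
-- from typing import List, NamedTuple
--
-- class Formatter:
--     s: str = ""
--     indent_count: int = 0
--     indent: str
--
--     def __init__(self, indent = " " * 4) -> None:
--         self.indent = indent
--
--     def add_line(self, line):
--         if len(line) > 0:
--             self.s += self.indent * self.indent_count + line + "\n"
--         else:
--             self.s += "\n"
--
--     def indent_add(self, i=1):
--         self.indent_count += i
--
--     def indent_sub(self, i=1):
--         self.indent_count -= i
--
--     def __iadd__(self, other):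
--         self.add_line(other)
--         return self
--
-- def gen_fops_recover(fops: List[str]) -> str:
--     fmt: Formatter = Formatter()
--     fmt += "static void fops_recover(const struct important_fops *cpy)"
--     fmt += "{"
--     fmt.indent_add()
--     fmt += "pr_info(\"recovering fops\");"
--     fmt += "wp_disable();"
--     fmt += ""
--
--     for f in fops:
--         fmt += f"fprot_recover(&cpy->{f});"
--
--     fmt += ""
--     fmt += "wp_enable();"
--     fmt.indent_sub()
--     fmt += "}"
--     fmt += ""
--
--     return fmt.s
-- ===== SOURCE B (Python) =====
-- def gen_fops_recover(fops):
--     lines = [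
--         "static void fops_recover(const struct important_fops *cpy)",
--         "{",
--         '    pr_info("recovering fops");',
--         "    wp_disable();",
--         "",
--     ] + [f"    fprot_recover(&cpy->{f});" for f in fops] + [
--         "",
--         "    wp_enable();",
--         "}",
--         "",
--     ]
--     return "\n".join(lines) + "\n"
-- ===== Notes on version B (the rewrite author's own statement) =====
-- stated objective: simpler
-- what changed: Replaced the mutable Formatter class (string accumulator mutated line by line with an indent counter) by a declarative list of lines — a comprehension for the variable block plus literal header/footer lines — joined once with '\n'.
import Mathlib
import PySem

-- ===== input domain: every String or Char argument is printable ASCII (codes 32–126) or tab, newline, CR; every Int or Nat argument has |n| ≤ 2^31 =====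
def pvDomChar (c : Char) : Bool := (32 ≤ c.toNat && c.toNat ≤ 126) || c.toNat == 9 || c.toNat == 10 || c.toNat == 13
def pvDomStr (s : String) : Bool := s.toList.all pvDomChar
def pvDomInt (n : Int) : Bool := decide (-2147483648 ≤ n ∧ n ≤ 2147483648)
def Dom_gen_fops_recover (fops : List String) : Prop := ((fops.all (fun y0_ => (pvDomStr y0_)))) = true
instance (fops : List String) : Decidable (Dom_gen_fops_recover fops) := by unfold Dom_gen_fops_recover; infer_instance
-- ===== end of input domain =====

-- B replaces A's mutable Formatter (string accumulator + indent counter) by a plain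
-- list of lines joined with "\n" (objective: simpler). Same return value for every input.

-- ===== PORT A =====
-- Formatter state: accumulated string and indent counter (a Python int).
structure PvFmt where
  s : String
  indentCount : Int
  deriving DecidableEq, Repr

-- "    " * n in Python: empty for n ≤ 0 (exact: Python string repetition).
def pvIndentRep (n : Int) : String := String.join (List.replicate n.toNat "    ")

-- Formatter.add_line
def pvAddLine (fmt : PvFmt) (line : String) : PvFmt :=
  if line.length > 0 then
    { fmt with s := fmt.s ++ (pvIndentRep fmt.indentCount ++ line ++ "\n") }
  else
    { fmt with s := fmt.s ++ "\n" }

-- Formatter.indent_add / indent_sub (default i = 1)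
def pvIndentAdd (fmt : PvFmt) : PvFmt := { fmt with indentCount := fmt.indentCount + 1 }
def pvIndentSub (fmt : PvFmt) : PvFmt := { fmt with indentCount := fmt.indentCount - 1 }

def gen_fops_recover (fops : List String) : String :=
  let fmt : PvFmt := { s := "", indentCount := 0 }
  let fmt := pvAddLine fmt "static void fops_recover(const struct important_fops *cpy)"
  let fmt := pvAddLine fmt "{"
  let fmt := pvIndentAdd fmt
  let fmt := pvAddLine fmt "pr_info(\"recovering fops\");"
  let fmt := pvAddLine fmt "wp_disable();"
  let fmt := pvAddLine fmt ""
  let fmt := fops.foldl (fun acc f => pvAddLine acc ("fprot_recover(&cpy->" ++ f ++ ");")) fmt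
  let fmt := pvAddLine fmt ""
  let fmt := pvAddLine fmt "wp_enable();"
  let fmt := pvIndentSub fmt
  let fmt := pvAddLine fmt "}"
  let fmt := pvAddLine fmt ""
  fmt.s

-- ===== PORT B =====
def pvLineB (f : String) : String := "    fprot_recover(&cpy->" ++ f ++ ");"

def gen_fops_recover_alt (fops : List String) : String :=
  String.intercalate "\n"
    (["static void fops_recover(const struct important_fops *cpy)",
      "{",
      "    pr_info(\"recovering fops\");",
      "    wp_disable();",
      ""]
     ++ fops.map pvLineB
     ++ ["",
         "    wp_enable();",
         "}",
         ""]) ++ "\n"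

-- ===== PRECONDITION & SPEC =====
def Spec_gen_fops_recover (fops : List String) (out : String) : Prop := out = gen_fops_recover_alt fops
instance (fops : List String) (out : String) : Decidable (Spec_gen_fops_recover fops out) := by unfold Spec_gen_fops_recover; infer_instance

-- ===== CLAIM (what is proved, stated in full; the proofs are below) =====
def Claim_equal_gen_fops_recover : Prop := ∀ (fops : List String), Dom_gen_fops_recover fops → Spec_gen_fops_recover fops (gen_fops_recover fops)

-- ===== LEMMAS AND PROOFS =====

-- the joined loop block: one "    fprot_recover(&cpy-><f>);\n" per field
def pvJ : List String → String
  | [] => ""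
  | f :: fs => pvLineB f ++ "\n" ++ pvJ fs

theorem pv_rep1 : pvIndentRep 1 = "    " := by decide

theorem pv_ic (s a b : String) (l : List String) :
    String.intercalate s (a :: b :: l) = a ++ s ++ String.intercalate s (b :: l) := by
  induction l generalizing a b with
  | nil => rfl
  | cons c cs ih =>
      have h : String.intercalate s (a :: b :: c :: cs)
          = String.intercalate s ((a ++ s ++ b) :: c :: cs) := rfl
      rw [h, ih, ih]; simp [String.append_assoc]

theorem pv_B_loop (fops : List String) :
    String.intercalate "\n" (fops.map pvLineB ++ ["", "    wp_enable();", "}", ""])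
      = pvJ fops ++ String.intercalate "\n" ["", "    wp_enable();", "}", ""] := by
  induction fops with
  | nil => simp [pvJ]
  | cons f fs ih =>
      rcases h : fs.map pvLineB ++ ["", "    wp_enable();", "}", ""] with _ | ⟨b, l⟩
      · simp at h
      · simp only [List.cons_append, List.map_cons, h, pv_ic]
        rw [← h, ih]
        simp [pvJ, String.append_assoc]
        decide

theorem pv_A_loop (fops : List String) (x : String) :
    fops.foldl (fun acc f => pvAddLine acc ("fprot_recover(&cpy->" ++ f ++ ");"))
        ({ s := x, indentCount := 1 } : PvFmt)
      = { s := x ++ pvJ fops, indentCount := 1 } := by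
  induction fops generalizing x with
  | nil => simp [pvJ]
  | cons f fs ih =>
      have h0 : 0 < "fprot_recover(&cpy->".length := by decide
      have hpos : 0 < ("fprot_recover(&cpy->" ++ f ++ ");").length := by
        simp [String.length_append]
        exact Or.inl (Or.inl h0)
      have hstep : pvAddLine ({ s := x, indentCount := 1 } : PvFmt)
            ("fprot_recover(&cpy->" ++ f ++ ");")
          = { s := x ++ (pvLineB f ++ "\n"), indentCount := 1 } := by
        unfold pvAddLine
        rw [if_pos hpos]
        simp [pv_rep1, pvLineB, ← String.append_assoc]
      rw [List.foldl_cons, hstep, ih]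
      simp [pvJ, String.append_assoc]

theorem pv_A_eval (fops : List String) :
    gen_fops_recover fops
      = ("static void fops_recover(const struct important_fops *cpy)\n{\n    pr_info(\"recovering fops\");\n    wp_disable();\n\n"
          ++ pvJ fops)
        ++ "\n    wp_enable();\n}\n\n" := by
  rw [show gen_fops_recover fops
      = (pvAddLine (pvAddLine (pvIndentSub (pvAddLine (pvAddLine
          (List.foldl (fun acc f => pvAddLine acc ("fprot_recover(&cpy->" ++ f ++ ");"))
            ({ s := "static void fops_recover(const struct important_fops *cpy)\n{\n    pr_info(\"recovering fops\");\n    wp_disable();\n\n",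
               indentCount := 1 } : PvFmt) fops)
          "") "wp_enable();")) "}") "").s from rfl]
  rw [pv_A_loop]
  have e1 : ∀ y : String, pvAddLine ({ s := y, indentCount := 1 } : PvFmt) ""
      = { s := y ++ "\n", indentCount := 1 } := fun y => by simp [pvAddLine]
  have e2 : ∀ y : String, pvAddLine ({ s := y, indentCount := 1 } : PvFmt) "wp_enable();"
      = { s := y ++ "    wp_enable();\n", indentCount := 1 } := fun y => by
    unfold pvAddLine
    rw [if_pos (by decide : ("wp_enable();" : String).length > 0)]
    simp [pv_rep1, -String.append_assoc]
  have e3 : ∀ y : String, pvIndentSub ({ s := y, indentCount := 1 } : PvFmt)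
      = { s := y, indentCount := 0 } := fun y => rfl
  have e4 : ∀ y : String, pvAddLine ({ s := y, indentCount := 0 } : PvFmt) "}"
      = { s := y ++ "}\n", indentCount := 0 } := fun y => by
    unfold pvAddLine
    rw [if_pos (by decide : ("}" : String).length > 0)]
    simp [pvIndentRep]
    decide
  have e5 : ∀ y : String, pvAddLine ({ s := y, indentCount := 0 } : PvFmt) ""
      = { s := y ++ "\n", indentCount := 0 } := fun y => by simp [pvAddLine]
  rw [e1, e2, e3, e4, e5]
  simp [String.append_assoc]

theorem pv_B_eval (fops : List String) :
    gen_fops_recover_alt fops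
      = ("static void fops_recover(const struct important_fops *cpy)\n{\n    pr_info(\"recovering fops\");\n    wp_disable();\n\n"
          ++ pvJ fops)
        ++ "\n    wp_enable();\n}\n\n" := by
  unfold gen_fops_recover_alt
  rcases h : fops.map pvLineB ++ ["", "    wp_enable();", "}", ""] with _ | ⟨b, l⟩
  · simp at h
  · simp only [List.cons_append, List.nil_append]
    rw [h, pv_ic, pv_ic, pv_ic, pv_ic, pv_ic, ← h, pv_B_loop]
    rw [show String.intercalate "\n" ["", "    wp_enable();", "}", ""]
        = "\n    wp_enable();\n}\n" from by decide]
    simp [String.append_assoc]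
    simp [← String.append_assoc]

-- ===== VERDICT (by name: the statement is the Claim_ definition above) =====
theorem gen_fops_recover_spec : Claim_equal_gen_fops_recover := by
  intro fops _
  unfold Spec_gen_fops_recover
  rw [pv_A_eval, pv_B_eval]
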